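-- pv_equiv track=rewrite | github.com/miliar/Code_Jam_Webscraper | solutions_python/Problem_184/725.py | solve
-- ===== SOURCE A (Python) =====
-- def solve(problem):
--     answer = []
--     problem=list(problem)
--     first ={ 'Z':('0','ZERO'), 'W':('2','TWO'), 'U':('4','FOUR'), 'X':('6','SIX'), 'G':('8','EIGHT')}
--     second = { 'H':('3','THREE'), 'F':('5','FIVE') }
--     third = { 'O':('1', 'ONE'), 'S':('7', 'SEVEN') }
--     fourth = { 'I':('9', 'NINE') }
--
--     def unique(s):
--         for u in s:
--             n=problem.count(u)
--             if n>0: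
--                 answer.append(n * s[u][0])
--                 for l in s[u][1]:
--                     for _ in range(n):
--                         problem.remove(l)
--
--     unique(first)
--     unique(second)
--     unique(third)
--     unique(fourth)
--     #answer.append([problem])
--     return "".join(sorted(answer))
-- ===== SOURCE B (Python) =====
-- def solve(problem):
--     c = {}
--     for ch in problem:
--         c[ch] = c.get(ch, 0) + 1
--     g = c.get
--     n = [0] * 10
--     n[0] = g('Z', 0)
--     n[2] = g('W', 0)
--     n[4] = g('U', 0)
--     n[6] = g('X', 0)
--     n[8] = g('G', 0)
--     n[3] = g('H', 0) - n[8]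
--     n[5] = g('F', 0) - n[4]
--     n[1] = g('O', 0) - n[0] - n[2] - n[4]
--     n[7] = g('S', 0) - n[6]
--     n[9] = g('I', 0) - n[5] - n[6] - n[8]
--     return ''.join(str(d) * n[d] for d in range(10))
-- ===== Notes on version B (the rewrite author's own statement) =====
-- stated objective: faster
-- what changed: A repeatedly counts a key letter and then removes every letter of the spelled-out digit word from a mutable list (quadratic count/remove scans), then sorts the collected runs; B counts letter frequencies in a single pass and derives each digit's multiplicity by closed-form arithmetic on those counts, emitting the digit runs directly in ascending order with no sort.
import Mathlib
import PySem

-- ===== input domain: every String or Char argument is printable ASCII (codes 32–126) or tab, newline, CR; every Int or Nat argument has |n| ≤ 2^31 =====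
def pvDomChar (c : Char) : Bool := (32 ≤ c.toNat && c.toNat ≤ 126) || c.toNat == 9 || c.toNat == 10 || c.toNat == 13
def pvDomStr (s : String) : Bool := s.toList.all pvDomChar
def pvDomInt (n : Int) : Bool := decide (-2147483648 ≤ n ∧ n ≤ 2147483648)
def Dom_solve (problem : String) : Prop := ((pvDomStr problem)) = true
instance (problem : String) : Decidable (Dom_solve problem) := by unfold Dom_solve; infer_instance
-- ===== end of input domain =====

-- B replaces A's repeated count-and-remove passes over the letter list by one counting
-- pass and closed-form arithmetic on the letter frequencies (objective: faster).

-- ===== PORT A =====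
-- A's four dicts, flattened in A's iteration order (Python dicts iterate in insertion order)
def pvStages : List (Char × Char × List Char) :=
  [('Z', '0', ['Z','E','R','O']),
   ('W', '2', ['T','W','O']),
   ('U', '4', ['F','O','U','R']),
   ('X', '6', ['S','I','X']),
   ('G', '8', ['E','I','G','H','T']),
   ('H', '3', ['T','H','R','E','E']),
   ('F', '5', ['F','I','V','E']),
   ('O', '1', ['O','N','E']),
   ('S', '7', ['S','E','V','E','N']),
   ('I', '9', ['N','I','N','E'])]

-- 'for _ in range(n): problem.remove(l)' — none exactly where Python raises ValueError
def pvRemoveN (l : Char) : Nat → List Char → Option (List Char)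
  | 0, p => some p
  | n + 1, p => (PySem.List.remove? p l).bind (pvRemoveN l n)

-- 'for l in s[u][1]: …'
def pvRemoveWord (n : Nat) : List Char → List Char → Option (List Char)
  | [], p => some p
  | l :: ls, p => (pvRemoveN l n p).bind (pvRemoveWord n ls)

-- one iteration of the 'for u in s' loop of unique(), acting on the pair (answer, problem)
def pvStep (st : List (List Char) × List Char) (stage : Char × Char × List Char) :
    Option (List (List Char) × List Char) :=
  let n := PySem.List.count st.2 stage.1
  if 0 < n then
    (pvRemoveWord n stage.2.2 st.2).map
      (fun p' => (st.1 ++ [List.replicate n stage.2.1], p'))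
  else
    some st

def solve (problem : String) : String :=
  match pvStages.foldlM pvStep ([], problem.toList) with
  | some st => String.mk (PySem.Chars.join [] (PySem.List.sorted st.1 (fun x => x)))
  | none => ""   -- Python raises ValueError here; Pre_solve excludes exactly these inputs

-- ===== PORT B =====
def solve_alt (problem : String) : String :=
  let c : PySem.Dict Char Int :=
    problem.toList.foldl (fun d x => d.insert x (d.getD x 0 + 1)) PySem.Dict.empty
  let g : Char → Int := fun ch => c.getD ch 0
  let n0 := g 'Z'
  let n2 := g 'W'
  let n4 := g 'U'
  let n6 := g 'X'
  let n8 := g 'G'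
  let n3 := g 'H' - n8
  let n5 := g 'F' - n4
  let n1 := g 'O' - n0 - n2 - n4
  let n7 := g 'S' - n6
  let n9 := g 'I' - n5 - n6 - n8
  String.mk (List.replicate n0.toNat '0' ++ (List.replicate n1.toNat '1' ++
    (List.replicate n2.toNat '2' ++ (List.replicate n3.toNat '3' ++
    (List.replicate n4.toNat '4' ++ (List.replicate n5.toNat '5' ++
    (List.replicate n6.toNat '6' ++ (List.replicate n7.toNat '7' ++
    (List.replicate n8.toNat '8' ++ List.replicate n9.toNat '9')))))))))

-- ===== PRECONDITION & SPEC =====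
-- Pre_solve excludes exactly the inputs on which A raises ValueError (problem.remove of a
-- missing letter): the letter counts must supply every spelled-out word A removes.
def Pre_solve (problem : String) : Prop :=
  let c : Char → Int := fun l => ((problem.toList.count l : Nat) : Int)
  let n0 := c 'Z'
  let n2 := c 'W'
  let n4 := c 'U'
  let n6 := c 'X'
  let n8 := c 'G'
  let n3 := c 'H' - n8
  let n5 := c 'F' - n4
  let n1 := c 'O' - n0 - n2 - n4
  let n7 := c 'S' - n6
  let n9 := c 'I' - n5 - n6 - n8
  c 'E' ≥ n0 ∧ c 'R' ≥ n0 ∧ c 'O' ≥ n0 ∧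
  c 'T' ≥ n2 ∧ c 'O' - n0 ≥ n2 ∧
  c 'F' ≥ n4 ∧ c 'O' - n0 - n2 ≥ n4 ∧ c 'R' - n0 ≥ n4 ∧
  c 'S' ≥ n6 ∧ c 'I' ≥ n6 ∧
  c 'E' - n0 ≥ n8 ∧ c 'I' - n6 ≥ n8 ∧ c 'H' ≥ n8 ∧ c 'T' - n2 ≥ n8 ∧
  c 'T' - n2 - n8 ≥ n3 ∧ c 'R' - n0 - n4 ≥ n3 ∧ c 'E' - n0 - n8 ≥ 2 * n3 ∧
  c 'I' - n6 - n8 ≥ n5 ∧ c 'V' ≥ n5 ∧ c 'E' - n0 - n8 - 2 * n3 ≥ n5 ∧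
  c 'N' ≥ n1 ∧ c 'E' - n0 - n8 - 2 * n3 - n5 ≥ n1 ∧
  c 'E' - n0 - n8 - 2 * n3 - n5 - n1 ≥ 2 * n7 ∧ c 'V' - n5 ≥ n7 ∧ c 'N' - n1 ≥ n7 ∧
  c 'N' - n1 - n7 ≥ 2 * n9 ∧ c 'E' - n0 - n8 - 2 * n3 - n5 - n1 - 2 * n7 ≥ n9

instance (problem : String) : Decidable (Pre_solve problem) := by
  unfold Pre_solve; infer_instance

def pvWitness_solve : String := "ONE"

def Spec_solve (problem : String) (out : String) : Prop := out = solve_alt problem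
instance (problem : String) (out : String) : Decidable (Spec_solve problem out) := by
  unfold Spec_solve; infer_instance

-- ===== CLAIM (what is proved, stated in full; the proofs are below) =====
def Claim_equal_solve : Prop :=
  ∀ (problem : String), Dom_solve problem → Pre_solve problem →
    Spec_solve problem (solve problem)

-- ===== LEMMAS AND PROOFS =====

-- the answer entry one stage contributes: a run of its digit, or nothing
def pvB (n : Nat) (d : Char) : List (List Char) :=
  if 0 < n then [List.replicate n d] else []

lemma pvMem_pvB {a : List Char} {n : Nat} {d : Char} (h : a ∈ pvB n d) :
    0 < n ∧ a = List.replicate n d := by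
  unfold pvB at h
  split at h <;> simp_all

lemma pvPairwise_pvB (n : Nat) (d : Char) :
    (pvB n d).Pairwise (fun a b : List Char => a ≤ b) := by
  unfold pvB; split <;> simp

lemma pvRemoveN_spec (l : Char) (n : Nat) (p : List Char) (h : n ≤ p.count l) :
    ∃ q, pvRemoveN l n p = some q ∧
      ∀ x, q.count x = p.count x - (if l = x then n else 0) := by
  induction n generalizing p with
  | zero => exact ⟨p, rfl, by simp⟩
  | succ m ih =>
    have hmem : l ∈ p := List.count_pos_iff.mp (by omega)
    obtain ⟨q, hq, hcnt⟩ := ih (p.erase l) (by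
      rw [List.count_erase]; simp; omega)
    refine ⟨q, ?_, ?_⟩
    · simp [pvRemoveN, PySem.List.remove?_eq_some_erase p l hmem, hq]
    · intro x
      rw [hcnt x, List.count_erase]
      by_cases hx : l = x <;> simp [hx] <;> omega

lemma pvRemoveWord_spec (w : List Char) (n : Nat) (p : List Char)
    (h : ∀ x, n * w.count x ≤ p.count x) :
    ∃ q, pvRemoveWord n w p = some q ∧
      ∀ x, q.count x = p.count x - n * w.count x := by
  induction w generalizing p with
  | nil => exact ⟨p, rfl, by simp⟩
  | cons l ls ih =>
    have hl := h l
    rw [List.count_cons_self] at hl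
    have hexp : n * (ls.count l + 1) = n * ls.count l + n := by ring
    obtain ⟨q1, hq1, hc1⟩ := pvRemoveN_spec l n p (by omega)
    obtain ⟨q2, hq2, hc2⟩ := ih q1 (by
      intro x
      rw [hc1 x]
      have hx2 := h x
      by_cases hx : l = x
      · subst hx
        rw [List.count_cons_self] at hx2
        rw [if_pos rfl]
        omega
      · rw [List.count_cons_of_ne hx] at hx2
        simp [hx]; omega)
    refine ⟨q2, by simp [pvRemoveWord, hq1, hq2], ?_⟩
    intro x
    rw [hc2 x, hc1 x]
    by_cases hx : l = x
    · subst hx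
      rw [List.count_cons_self, if_pos rfl]
      omega
    · rw [List.count_cons_of_ne hx]
      simp [hx]

lemma pvStep_spec (u d : Char) (w : List Char) (ans : List (List Char)) (p : List Char)
    (h : ∀ x ∈ w, p.count u * w.count x ≤ p.count x) :
    ∃ q, pvStep (ans, p) (u, d, w) = some (ans ++ pvB (p.count u) d, q) ∧
      ∀ x, q.count x = p.count x - p.count u * w.count x := by
  have h' : ∀ x, p.count u * w.count x ≤ p.count x := by
    intro x
    by_cases hx : x ∈ w
    · exact h x hx
    · simp [List.count_eq_zero_of_not_mem hx]
  by_cases hn : 0 < p.count u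
  · obtain ⟨q, hq, hc⟩ := pvRemoveWord_spec w (p.count u) p h'
    refine ⟨q, ?_, hc⟩
    simp [pvStep, PySem.List.count_eq, hn, hq, pvB]
  · have hz : p.count u = 0 := by omega
    refine ⟨p, ?_, by simp [hz]⟩
    simp [pvStep, PySem.List.count_eq, hz, pvB]

lemma pvRep_le_pvRep {a b : Char} (hab : a < b) (m : Nat) {n : Nat} (hn : 0 < n) :
    List.replicate m a ≤ List.replicate n b := by
  have hlt : List.replicate m a < List.replicate n b := by
    cases n with
    | zero => omega
    | succ k =>
      rw [List.replicate_succ]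
      cases m with
      | zero => exact List.Lex.nil
      | succ j => rw [List.replicate_succ]; exact List.Lex.rel hab
  exact le_of_lt hlt

lemma pvJoin_flatten (parts : List (List Char)) :
    PySem.Chars.join [] parts = parts.flatten := by
  induction parts with
  | nil => rfl
  | cons x t ih =>
    cases t with
    | nil => simp [PySem.Chars.join, List.intercalate]
    | cons y s =>
      simp [PySem.Chars.join, List.intercalate] at ih ⊢
      simpa using ih

lemma pvFlatten_pvB (n : Nat) (d : Char) : (pvB n d).flatten = List.replicate n d := by
  unfold pvB
  split <;> simp_all <;> omega

lemma pvApp_congr {α : Type} {a b c d : List α} (h1 : a = b) (h2 : c = d) :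
    a ++ c = b ++ d := by rw [h1, h2]

lemma pvRep_congr {m n : Nat} (d : Char) (h : m = n) :
    List.replicate m d = List.replicate n d := by rw [h]

lemma pvSorted_runs (n0 n1 n2 n3 n4 n5 n6 n7 n8 n9 : Nat) :
    PySem.List.sorted
      (pvB n0 '0' ++ (pvB n2 '2' ++ (pvB n4 '4' ++ (pvB n6 '6' ++ (pvB n8 '8' ++
       (pvB n3 '3' ++ (pvB n5 '5' ++ (pvB n1 '1' ++ (pvB n7 '7' ++ pvB n9 '9')))))))))
      (fun x => x) =
    pvB n0 '0' ++ (pvB n1 '1' ++ (pvB n2 '2' ++ (pvB n3 '3' ++ (pvB n4 '4' ++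
      (pvB n5 '5' ++ (pvB n6 '6' ++ (pvB n7 '7' ++ (pvB n8 '8' ++ pvB n9 '9')))))))) := by
  have hinst : (fun (a b : List Char) => a.decidableLT b) =
      (LinearOrder.toDecidableLT : DecidableLT (List Char)) := by
    funext a b; exact Subsingleton.elim _ _
  rw [hinst]
  apply PySem.List.sorted_id_eq_of_perm_of_pairwise
  · have hp : (([0,1,2,3,4,5,6,7,8,9] : List Nat)).Perm [0,2,4,6,8,3,5,1,7,9] := by decide
    have hfm := List.Perm.flatMap
      (f := fun i => ([pvB n0 '0', pvB n1 '1', pvB n2 '2', pvB n3 '3', pvB n4 '4',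
          pvB n5 '5', pvB n6 '6', pvB n7 '7', pvB n8 '8', pvB n9 '9'].getD i []))
      (g := fun i => ([pvB n0 '0', pvB n1 '1', pvB n2 '2', pvB n3 '3', pvB n4 '4',
          pvB n5 '5', pvB n6 '6', pvB n7 '7', pvB n8 '8', pvB n9 '9'].getD i []))
      hp (by intro a _; exact List.Perm.refl _)
    simpa [List.flatMap] using hfm
  · have hR : pvB n0 '0' ++ (pvB n1 '1' ++ (pvB n2 '2' ++ (pvB n3 '3' ++ (pvB n4 '4' ++
        (pvB n5 '5' ++ (pvB n6 '6' ++ (pvB n7 '7' ++ (pvB n8 '8' ++ pvB n9 '9')))))))) =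
        (([('0',n0),('1',n1),('2',n2),('3',n3),('4',n4),('5',n5),('6',n6),('7',n7),('8',n8),('9',n9)] :
          List (Char × Nat)).flatMap (fun p => pvB p.2 p.1)) := by
      simp [List.flatMap]
    rw [hR, List.pairwise_flatMap]
    constructor
    · intro a _; exact pvPairwise_pvB _ _
    · have hfst : (([('0',n0),('1',n1),('2',n2),('3',n3),('4',n4),('5',n5),('6',n6),('7',n7),('8',n8),('9',n9)] :
          List (Char × Nat))).Pairwise (fun p q => p.1 < q.1) := by
        simp [List.pairwise_cons]
      refine hfst.imp ?_
      intro p q hpq x hx y hy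
      obtain ⟨hnx, hxe⟩ := pvMem_pvB hx
      obtain ⟨hny, hye⟩ := pvMem_pvB hy
      subst hxe; subst hye
      exact pvRep_le_pvRep hpq _ hny

-- ===== VERDICT (by name: the statement is the Claim_ definition above) =====
set_option maxHeartbeats 4000000 in
theorem solve_spec : Claim_equal_solve := by
  unfold Claim_equal_solve
  intro problem _ hpre
  unfold Spec_solve solve solve_alt
  unfold Pre_solve at hpre
  dsimp only at hpre
  set L := problem.toList with hLdef
  obtain ⟨a1,a2,a3,a4,a5,a6,a7,a8,a9,a10,a11,a12,a13,a14,a15,a16,a17,a18,a19,a20,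
    a21,a22,a23,a24,a25,a26,a27⟩ := hpre
  simp only [pvStages, List.foldlM_cons, List.foldlM_nil]
  obtain ⟨q1, e1, hc1⟩ := pvStep_spec 'Z' '0' ['Z','E','R','O'] ([] : List (List Char)) L (by
    intro x hx; fin_cases hx <;> simp [List.count_cons, List.count_nil] <;> omega)
  rw [e1]
  set A1 := ([] : List (List Char)) ++ pvB (List.count 'Z' L) '0' with hA1
  simp only [Option.bind_eq_bind, Option.bind_some]
  obtain ⟨q2, e2, hc2⟩ := pvStep_spec 'W' '2' ['T','W','O'] A1 q1 (by
    intro x hx; fin_cases hx <;> simp [hc1, List.count_cons, List.count_nil] <;> omega)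
  rw [e2]
  set A2 := A1 ++ pvB (List.count 'W' q1) '2' with hA2
  simp only [Option.bind_eq_bind, Option.bind_some]
  obtain ⟨q3, e3, hc3⟩ := pvStep_spec 'U' '4' ['F','O','U','R'] A2 q2 (by
    intro x hx; fin_cases hx <;> simp [hc1, hc2, List.count_cons, List.count_nil] <;> omega)
  rw [e3]
  set A3 := A2 ++ pvB (List.count 'U' q2) '4' with hA3
  simp only [Option.bind_eq_bind, Option.bind_some]
  obtain ⟨q4, e4, hc4⟩ := pvStep_spec 'X' '6' ['S','I','X'] A3 q3 (by
    intro x hx; fin_cases hx <;> simp [hc1, hc2, hc3, List.count_cons, List.count_nil] <;> omega)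
  rw [e4]
  set A4 := A3 ++ pvB (List.count 'X' q3) '6' with hA4
  simp only [Option.bind_eq_bind, Option.bind_some]
  obtain ⟨q5, e5, hc5⟩ := pvStep_spec 'G' '8' ['E','I','G','H','T'] A4 q4 (by
    intro x hx; fin_cases hx <;> simp [hc1, hc2, hc3, hc4, List.count_cons, List.count_nil] <;> omega)
  rw [e5]
  set A5 := A4 ++ pvB (List.count 'G' q4) '8' with hA5
  simp only [Option.bind_eq_bind, Option.bind_some]
  obtain ⟨q6, e6, hc6⟩ := pvStep_spec 'H' '3' ['T','H','R','E','E'] A5 q5 (by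
    intro x hx; fin_cases hx <;> simp [hc1, hc2, hc3, hc4, hc5, List.count_cons, List.count_nil] <;> omega)
  rw [e6]
  set A6 := A5 ++ pvB (List.count 'H' q5) '3' with hA6
  simp only [Option.bind_eq_bind, Option.bind_some]
  obtain ⟨q7, e7, hc7⟩ := pvStep_spec 'F' '5' ['F','I','V','E'] A6 q6 (by
    intro x hx; fin_cases hx <;> simp [hc1, hc2, hc3, hc4, hc5, hc6, List.count_cons, List.count_nil] <;> omega)
  rw [e7]
  set A7 := A6 ++ pvB (List.count 'F' q6) '5' with hA7
  simp only [Option.bind_eq_bind, Option.bind_some]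
  obtain ⟨q8, e8, hc8⟩ := pvStep_spec 'O' '1' ['O','N','E'] A7 q7 (by
    intro x hx; fin_cases hx <;> simp [hc1, hc2, hc3, hc4, hc5, hc6, hc7, List.count_cons, List.count_nil] <;> omega)
  rw [e8]
  set A8 := A7 ++ pvB (List.count 'O' q7) '1' with hA8
  simp only [Option.bind_eq_bind, Option.bind_some]
  obtain ⟨q9, e9, hc9⟩ := pvStep_spec 'S' '7' ['S','E','V','E','N'] A8 q8 (by
    intro x hx; fin_cases hx <;> simp [hc1, hc2, hc3, hc4, hc5, hc6, hc7, hc8, List.count_cons, List.count_nil] <;> omega)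
  rw [e9]
  set A9 := A8 ++ pvB (List.count 'S' q8) '7' with hA9
  simp only [Option.bind_eq_bind, Option.bind_some]
  obtain ⟨q10, e10, hc10⟩ := pvStep_spec 'I' '9' ['N','I','N','E'] A9 q9 (by
    intro x hx; fin_cases hx <;> simp [hc1, hc2, hc3, hc4, hc5, hc6, hc7, hc8, hc9, List.count_cons, List.count_nil] <;> omega)
  rw [e10]
  set A10 := A9 ++ pvB (List.count 'I' q9) '9' with hA10
  simp only [Option.bind_eq_bind, Option.bind_some]
  -- final: sort the runs and compare with B's arithmetic
  simp only [hA10, hA9, hA8, hA7, hA6, hA5, hA4, hA3, hA2, hA1]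
  simp only [List.nil_append, List.append_assoc]
  rw [pvSorted_runs (List.count 'Z' L) (List.count 'O' q7) (List.count 'W' q1)
    (List.count 'H' q5) (List.count 'U' q2) (List.count 'F' q6) (List.count 'X' q3)
    (List.count 'S' q8) (List.count 'G' q4) (List.count 'I' q9)]
  rw [pvJoin_flatten]
  simp only [List.flatten_append, pvFlatten_pvB]
  simp [hc9, hc8, hc7, hc6, hc5, hc4, hc3, hc2, hc1,
    PySem.Dict.getD_foldl_insert_add_one, PySem.Dict.getD_empty]
  refine congrArg String.mk (pvApp_congr (pvRep_congr _ (by omega)) (pvApp_congr (pvRep_congr _ (by omega)) (pvApp_congr (pvRep_congr _ (by omega)) (pvApp_congr (pvRep_congr _ (by omega)) (pvApp_congr (pvRep_congr _ (by omega)) (pvApp_congr (pvRep_congr _ (by omega)) (pvApp_congr (pvRep_congr _ (by omega)) (pvApp_congr (pvRep_congr _ (by omega)) (pvApp_congr (pvRep_congr _ (by omega)) (pvRep_congr _ (by omega)))))))))))
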